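-- pv_equiv track=rewrite | github.com/RaggedR/stomachion | solver/dissection_coalgebra.py | fault_lines
-- ===== SOURCE A (Python) =====
-- def fault_lines(pieces, width, height):
--     """Find all axis-aligned fault lines of a dissection.
--
--     A fault line y=k (or x=k) exists when NO piece straddles it.
--     Returns list of ('h', k) or ('v', k).
--     """
--     y_ranges = [(min(v[1] for v in p), max(v[1] for v in p)) for p in pieces]
--     x_ranges = [(min(v[0] for v in p), max(v[0] for v in p)) for p in pieces]
--
--     faults = []
--     for k in range(1, height):
--         if not any(y_min < k < y_max for y_min, y_max in y_ranges):
--             faults.append(('h', k))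
--     for k in range(1, width):
--         if not any(x_min < k < x_max for x_min, x_max in x_ranges):
--             faults.append(('v', k))
--     return faults
-- ===== SOURCE B (Python) =====
-- def fault_lines(pieces, width, height):
--     """Find all axis-aligned fault lines of a dissection.
--
--     Difference-array sweep: per axis, each piece's open straddle interval
--     (clamped to the candidate window) adds +1/-1 events to a dict; one
--     running-sum pass over the candidates then emits every line whose
--     straddle count is zero.  O(n + width + height) instead of A's
--     per-candidate scan of all pieces.
--     """
--     def axis(tag, idx, dim):
--         diff = {}
--         for p in pieces:
--             lo = min(v[idx] for v in p)
--             hi = max(v[idx] for v in p)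
--             a = max(lo + 1, 1)
--             b = min(hi, dim)
--             if a < b:
--                 diff[a] = diff.get(a, 0) + 1
--                 diff[b] = diff.get(b, 0) - 1
--         out = []
--         run = 0
--         for k in range(1, dim):
--             run += diff.get(k, 0)
--             if run == 0:
--                 out.append((tag, k))
--         return out
--     return axis('h', 1, height) + axis('v', 0, width)
-- ===== Notes on version B (the rewrite author's own statement) =====
-- stated objective: faster
-- what changed: B replaces A's per-candidate scan of all pieces by a difference-array sweep: each piece adds +1/-1 events at its clamped straddle-interval endpoints into a dict, then one running-sum pass per axis emits every candidate whose straddle count is zero.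
import Mathlib
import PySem

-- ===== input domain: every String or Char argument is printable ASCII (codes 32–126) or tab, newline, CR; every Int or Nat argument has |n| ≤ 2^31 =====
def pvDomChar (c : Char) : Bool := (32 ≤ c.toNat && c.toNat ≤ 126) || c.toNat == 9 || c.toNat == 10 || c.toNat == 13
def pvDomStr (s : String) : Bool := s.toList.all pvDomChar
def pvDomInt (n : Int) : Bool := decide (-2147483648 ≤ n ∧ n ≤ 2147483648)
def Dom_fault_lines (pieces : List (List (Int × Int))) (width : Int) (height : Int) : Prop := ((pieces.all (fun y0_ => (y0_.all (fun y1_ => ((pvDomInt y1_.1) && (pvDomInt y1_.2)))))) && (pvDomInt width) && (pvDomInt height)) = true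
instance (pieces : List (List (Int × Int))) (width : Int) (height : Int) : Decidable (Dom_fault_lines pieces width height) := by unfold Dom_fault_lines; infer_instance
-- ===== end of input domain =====

-- B replaces A's per-candidate scan of all pieces by a difference-array sweep (+1/-1 endpoint events, then one running-sum pass per axis).

-- ===== PORT A =====
def fault_lines (pieces : List (List (Int × Int))) (width : Int) (height : Int) : List (String × Int) :=
  let y_ranges := pieces.map (fun p =>
    ((PySem.List.min? (p.map (fun v => v.2)) (fun y => y)).getD 0,
     (PySem.List.max? (p.map (fun v => v.2)) (fun y => y)).getD 0))
  let x_ranges := pieces.map (fun p =>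
    ((PySem.List.min? (p.map (fun v => v.1)) (fun y => y)).getD 0,
     (PySem.List.max? (p.map (fun v => v.1)) (fun y => y)).getD 0))
  let faults := (PySem.List.pyRange 1 height 1).foldl (fun acc k =>
    if !(y_ranges.any (fun r => decide (r.1 < k) && decide (k < r.2))) then acc ++ [(("h" : String), k)] else acc) []
  (PySem.List.pyRange 1 width 1).foldl (fun acc k =>
    if !(x_ranges.any (fun r => decide (r.1 < k) && decide (k < r.2))) then acc ++ [(("v" : String), k)] else acc) faults

-- ===== PORT B =====
-- per-axis helper of Source B ('axis'): build the +1/-1 difference dict, then one running-sum pass over range(1, dim)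
def faultAxis (pieces : List (List (Int × Int))) (tag : String) (proj : (Int × Int) → Int) (dim : Int) : List (String × Int) :=
  let diff : PySem.Dict Int Int := pieces.foldl (fun d p =>
    let lo := (PySem.List.min? (p.map proj) (fun y => y)).getD 0
    let hi := (PySem.List.max? (p.map proj) (fun y => y)).getD 0
    let a := max (lo + 1) 1
    let b := min hi dim
    if a < b then (d.modify a 0 (· + 1)).modify b 0 (· - 1) else d) PySem.Dict.empty
  ((PySem.List.pyRange 1 dim 1).foldl
    (fun (st : Int × List (String × Int)) k =>
      let run := st.1 + diff.getD k 0
      (run, if run == 0 then st.2 ++ [(tag, k)] else st.2)) (0, [])).2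

def fault_lines_alt (pieces : List (List (Int × Int))) (width : Int) (height : Int) : List (String × Int) :=
  faultAxis pieces "h" (fun v => v.2) height ++ faultAxis pieces "v" (fun v => v.1) width

-- ===== PRECONDITION & SPEC =====
-- Pre_ excludes exactly the inputs containing an empty piece, on which Python's min()/max() raise ValueError.
def Pre_fault_lines (pieces : List (List (Int × Int))) (width : Int) (height : Int) : Prop :=
  ∀ p ∈ pieces, p ≠ []
instance (pieces : List (List (Int × Int))) (width : Int) (height : Int) : Decidable (Pre_fault_lines pieces width height) := by unfold Pre_fault_lines; infer_instance
def pvWitness_fault_lines : (List (List (Int × Int))) × Int × Int := ([[(0, 0), (2, 1)], [(0, 1), (2, 3)]], 2, 3)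

def Spec_fault_lines (pieces : List (List (Int × Int))) (width : Int) (height : Int) (out : List (String × Int)) : Prop := out = fault_lines_alt pieces width height
instance (pieces : List (List (Int × Int))) (width : Int) (height : Int) (out : List (String × Int)) : Decidable (Spec_fault_lines pieces width height out) := by unfold Spec_fault_lines; infer_instance

-- ===== CLAIM (what is proved, stated in full; the proofs are below) =====
def Claim_equal_fault_lines : Prop := ∀ (pieces : List (List (Int × Int))) (width : Int) (height : Int), Dom_fault_lines pieces width height → Pre_fault_lines pieces width height → Spec_fault_lines pieces width height (fault_lines pieces width height)

-- ===== LEMMAS AND PROOFS =====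

-- piece p's clamped blocked interval on an axis is [fa p, fb p)
def fa (proj : (Int × Int) → Int) (p : List (Int × Int)) : Int :=
  max ((PySem.List.min? (p.map proj) (fun y => y)).getD 0 + 1) 1
def fb (proj : (Int × Int) → Int) (dim : Int) (p : List (Int × Int)) : Int :=
  min ((PySem.List.max? (p.map proj) (fun y => y)).getD 0) dim

-- the +1/-1 event weight piece p contributes at coordinate k
def contrib (proj : (Int × Int) → Int) (dim : Int) (p : List (Int × Int)) (k : Int) : Int :=
  if fa proj p < fb proj dim p then
    (if k = fa proj p then 1 else 0) + (if k = fb proj dim p then -1 else 0)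
  else 0

-- number of pieces whose clamped interval covers k
def cntAt (pieces : List (List (Int × Int))) (proj : (Int × Int) → Int) (dim : Int) (k : Int) : Int :=
  (pieces.map (fun p => if fa proj p ≤ k ∧ k < fb proj dim p then (1 : Int) else 0)).sum

lemma contrib_pointwise (a b k : Int) :
    (if a ≤ k ∧ k < b then (1 : Int) else 0)
      = (if a ≤ k - 1 ∧ k - 1 < b then (1 : Int) else 0)
        + (if a < b then (if k = a then (1 : Int) else 0) + (if k = b then -1 else 0) else 0) := by
  split_ifs <;> omega

lemma cnt_succ (pieces : List (List (Int × Int))) (proj : (Int × Int) → Int) (dim k : Int) :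
    cntAt pieces proj dim k
      = cntAt pieces proj dim (k - 1) + (pieces.map (fun p => contrib proj dim p k)).sum := by
  induction pieces with
  | nil => simp [cntAt]
  | cons p rest ih =>
    simp only [cntAt, contrib, List.map_cons, List.sum_cons] at *
    rw [ih, contrib_pointwise (fa proj p) (fb proj dim p) k]
    ring

lemma cnt_zero (pieces : List (List (Int × Int))) (proj : (Int × Int) → Int) (dim : Int) :
    cntAt pieces proj dim 0 = 0 := by
  unfold cntAt
  apply List.sum_eq_zero
  intro x hx
  simp only [List.mem_map] at hx
  obtain ⟨p, _, rfl⟩ := hx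
  have h1 : (1 : Int) ≤ fa proj p := le_max_right _ 1
  split_ifs with h
  · omega
  · rfl

-- value of the difference dict built by B's first loop
lemma getD_diff_fold (proj : (Int × Int) → Int) (dim k : Int) :
    ∀ (ps : List (List (Int × Int))) (d : PySem.Dict Int Int),
    (ps.foldl (fun d p =>
      let lo := (PySem.List.min? (p.map proj) (fun y => y)).getD 0
      let hi := (PySem.List.max? (p.map proj) (fun y => y)).getD 0
      let a := max (lo + 1) 1
      let b := min hi dim
      if a < b then (d.modify a 0 (· + 1)).modify b 0 (· - 1) else d) d).getD k 0
    = d.getD k 0 + (ps.map (fun p => contrib proj dim p k)).sum := by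
  intro ps
  induction ps with
  | nil => simp
  | cons p rest ih =>
    intro d
    rw [List.foldl_cons, ih]
    simp only [List.map_cons, List.sum_cons]
    have hstep : (let lo := (PySem.List.min? (p.map proj) (fun y => y)).getD 0
        let hi := (PySem.List.max? (p.map proj) (fun y => y)).getD 0
        let a := max (lo + 1) 1
        let b := min hi dim
        if a < b then (d.modify a 0 (· + 1)).modify b 0 (· - 1) else d).getD k 0
        = d.getD k 0 + contrib proj dim p k := by
      show (if fa proj p < fb proj dim p then
          (d.modify (fa proj p) 0 (· + 1)).modify (fb proj dim p) 0 (· - 1) else d).getD k 0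
        = d.getD k 0 + contrib proj dim p k
      unfold contrib
      by_cases hab : fa proj p < fb proj dim p
      · simp only [hab, if_true, PySem.Dict.getD_modify]
        split_ifs <;> subst_vars <;> omega
      · simp [hab]
    rw [hstep]; ring

-- B's running-sum loop, for any event weights dv with prefix sums C
lemma run_fold (tag : String) (dv C : Int → Int) (hC : ∀ k, C k = C (k - 1) + dv k) (dim : Int) :
    ∀ (n : Nat) (m : Int) (acc : List (String × Int)), (dim - m).toNat = n →
    ((PySem.List.pyRange m dim 1).foldl
      (fun (st : Int × List (String × Int)) k =>
        (st.1 + dv k, if st.1 + dv k == 0 then st.2 ++ [(tag, k)] else st.2)) (C (m - 1), acc)).2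
    = acc ++ ((PySem.List.pyRange m dim 1).filter (fun k => C k == 0)).map (fun k => (tag, k)) := by
  intro n
  induction n with
  | zero =>
    intro m acc hn
    have hm : dim ≤ m := by omega
    rw [PySem.List.pyRange_one_eq_nil hm]
    simp
  | succ n ih =>
    intro m acc hn
    by_cases hm : m < dim
    · rw [PySem.List.pyRange_one_cons hm]
      rw [List.foldl_cons, List.filter_cons]
      have hCm : C (m - 1) + dv m = C m := (hC m).symm
      rw [hCm]
      have hnext : C m = C (m + 1 - 1) := by norm_num
      by_cases hz : C m == 0
      · simp only [hz, if_true]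
        rw [hnext, ih (m + 1) (acc ++ [(tag, m)]) (by omega)]
        simp
      · simp only [hz, Bool.false_eq_true, if_false]
        rw [hnext, ih (m + 1) acc (by omega)]
    · omega

-- closed form of B's per-axis helper
lemma faultAxis_eq (pieces : List (List (Int × Int))) (tag : String) (proj : (Int × Int) → Int) (dim : Int) :
    faultAxis pieces tag proj dim
    = ((PySem.List.pyRange 1 dim 1).filter (fun k => cntAt pieces proj dim k == 0)).map (fun k => (tag, k)) := by
  unfold faultAxis
  have hdv : ∀ k, ((pieces.foldl (fun d p =>
      let lo := (PySem.List.min? (p.map proj) (fun y => y)).getD 0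
      let hi := (PySem.List.max? (p.map proj) (fun y => y)).getD 0
      let a := max (lo + 1) 1
      let b := min hi dim
      if a < b then (d.modify a 0 (· + 1)).modify b 0 (· - 1) else d)
      (PySem.Dict.empty : PySem.Dict Int Int)).getD k 0)
      = (pieces.map (fun p => contrib proj dim p k)).sum := by
    intro k
    rw [getD_diff_fold proj dim k pieces PySem.Dict.empty]
    simp
  have hC : ∀ k, cntAt pieces proj dim k
      = cntAt pieces proj dim (k - 1)
        + ((pieces.foldl (fun d p =>
          let lo := (PySem.List.min? (p.map proj) (fun y => y)).getD 0
          let hi := (PySem.List.max? (p.map proj) (fun y => y)).getD 0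
          let a := max (lo + 1) 1
          let b := min hi dim
          if a < b then (d.modify a 0 (· + 1)).modify b 0 (· - 1) else d)
          (PySem.Dict.empty : PySem.Dict Int Int)).getD k 0) := by
    intro k
    rw [hdv k]
    exact cnt_succ pieces proj dim k
  have key := run_fold tag _ (cntAt pieces proj dim) hC dim (dim - 1).toNat 1 [] rfl
  have h0 : cntAt pieces proj dim (1 - 1) = 0 := by norm_num [cnt_zero]
  rw [h0] at key
  dsimp only
  exact key.trans (List.nil_append _)

-- on the candidate window 1 ≤ k < dim, "no piece straddles k" is "cntAt k = 0"
lemma pred_eq (pieces : List (List (Int × Int))) (proj : (Int × Int) → Int) (dim k : Int)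
    (hk : 1 ≤ k ∧ k < dim) :
    (!((pieces.map (fun p =>
        ((PySem.List.min? (p.map proj) (fun y => y)).getD 0,
         (PySem.List.max? (p.map proj) (fun y => y)).getD 0))).any
        (fun r => decide (r.1 < k) && decide (k < r.2))))
      = (cntAt pieces proj dim k == 0) := by
  have hcnt : cntAt pieces proj dim k
      = (pieces.countP (fun p => decide (fa proj p ≤ k ∧ k < fb proj dim p)) : Int) := by
    induction pieces with
    | nil => simp [cntAt]
    | cons p rest ih =>
      simp only [cntAt, List.map_cons, List.sum_cons, List.countP_cons,
        decide_eq_true_eq] at *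
      rw [ih]
      push_cast
      split_ifs <;> omega
  rw [Bool.eq_iff_iff, Bool.not_eq_true', hcnt]
  simp only [List.any_map, List.any_eq_false, Function.comp, Bool.and_eq_true,
    decide_eq_true_eq, not_and, beq_iff_eq, Int.natCast_eq_zero, List.countP_eq_zero]
  constructor
  · intro h p hp
    have := h p hp
    unfold fa fb
    omega
  · intro h p hp
    have := h p hp
    unfold fa fb at this
    omega

-- ===== VERDICT (by name: the statement is the Claim_ definition above) =====
theorem fault_lines_spec : Claim_equal_fault_lines := by
  intro pieces width height _ _
  unfold Spec_fault_lines fault_lines fault_lines_alt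
  rw [PySem.List.foldl_append_if, PySem.List.foldl_append_if, List.nil_append]
  rw [faultAxis_eq, faultAxis_eq]
  congr 1
  · congr 1
    apply List.filter_congr
    intro k hk
    rw [PySem.List.mem_pyRange_one] at hk
    exact pred_eq pieces (fun v => v.2) height k hk
  · congr 1
    apply List.filter_congr
    intro k hk
    rw [PySem.List.mem_pyRange_one] at hk
    exact pred_eq pieces (fun v => v.1) width k hk
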